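-- pv_equiv track=rewrite | github.com/masamoto1982/Ajisai | scripts/generate_qr.py | make_bitstream
-- ===== SOURCE A (Python) =====
-- DATA_CODEWORDS = 55
--
-- def make_bitstream(text):
--     data = text.encode("utf-8")
--     bits = [0, 1, 0, 0]  # byte mode
--     n = len(data)
--     bits += [(n >> i) & 1 for i in range(7, -1, -1)]
--     for b in data:
--         bits += [(b >> i) & 1 for i in range(7, -1, -1)]
--
--     capacity = DATA_CODEWORDS * 8
--     bits += [0] * min(4, capacity - len(bits))
--     while len(bits) % 8 != 0:
--         bits.append(0)
--
--     pads = [0xEC, 0x11]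
--     i = 0
--     while len(bits) < capacity:
--         p = pads[i % 2]
--         bits += [(p >> j) & 1 for j in range(7, -1, -1)]
--         i += 1
--     return bits
-- ===== SOURCE B (Python) =====
-- DATA_CODEWORDS = 55
--
-- def make_bitstream(text):
--     data = text.encode("utf-8")
--     nb = len(data) & 0xFF  # byte-mode count field is 8 bits wide
--     codewords = [0x40 | (nb >> 4)]
--     prev = nb & 0xF
--     for b in data:
--         codewords.append((prev << 4) | (b >> 4))
--         prev = b & 0xF
--     codewords.append(prev << 4)  # terminator nibble + byte alignment
--     i = 0
--     while len(codewords) < DATA_CODEWORDS: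
--         codewords.append([0xEC, 0x11][i % 2])
--         i += 1
--     return [(c >> j) & 1 for c in codewords for j in range(7, -1, -1)]
-- ===== Notes on version B (the rewrite author's own statement) =====
-- stated objective: alternative
-- what changed: B assembles a list of 8-bit integer codewords with a nibble carry (mode+count, shifted data bytes, terminator, then EC/11 pad codewords gated on the codeword count) and flattens to bits once at the end, instead of A's flat bit-list with bit-level terminator and alignment padding.
import Mathlib
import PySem

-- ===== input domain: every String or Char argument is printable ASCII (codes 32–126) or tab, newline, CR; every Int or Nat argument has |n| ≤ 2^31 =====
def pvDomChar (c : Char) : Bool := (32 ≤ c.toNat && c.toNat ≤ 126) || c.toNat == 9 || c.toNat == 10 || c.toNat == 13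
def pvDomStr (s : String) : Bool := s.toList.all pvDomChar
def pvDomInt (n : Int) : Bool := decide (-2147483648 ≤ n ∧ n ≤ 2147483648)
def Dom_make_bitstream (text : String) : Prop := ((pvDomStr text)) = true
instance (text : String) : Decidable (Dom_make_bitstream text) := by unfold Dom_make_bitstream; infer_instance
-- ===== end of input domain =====

-- B builds 8-bit codewords with a nibble carry and flattens them once, instead of A's flat bit-list bookkeeping (objective: alternative/idiomatic).

-- the comprehension [(x >> i) & 1 for i in range(7, -1, -1)], textually shared by both Pythons
-- (shift amounts here are the nonnegative range elements, so >>> is Python's >>)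
def pyBits8 (x : Int) : List Int :=
  (PySem.List.pyRange 7 (-1) (-1)).map (fun i => PySem.Int.band (x >>> i.toNat) 1)

theorem length_pyBits8 (x : Int) : (pyBits8 x).length = 8 := by
  have h : PySem.List.pyRange 7 (-1) (-1) = [7, 6, 5, 4, 3, 2, 1, 0] := by decide
  rw [pyBits8, h]; rfl

-- ===== PORT A =====
def DATA_CODEWORDS : Int := 55

-- while len(bits) % 8 != 0: bits.append(0)
def padAlign (bits : List Int) : List Int :=
  if bits.length % 8 ≠ 0 then padAlign (bits ++ [0]) else bits
termination_by (8 - bits.length % 8) % 8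
decreasing_by simp only [List.length_append, List.length_cons, List.length_nil]; omega

-- while len(bits) < capacity: p = pads[i % 2]; bits += [(p >> j) & 1 ...]; i += 1
-- (the index i % 2 is always 0 or 1, in range of pads, so pyGetD's default is never used)
def padECLoop (bits : List Int) (i : Int) : List Int :=
  if (bits.length : Int) < DATA_CODEWORDS * 8 then
    padECLoop (bits ++ pyBits8 (PySem.List.pyGetD [0xEC, 0x11] (PySem.Int.mod i 2) 0)) (i + 1)
  else bits
termination_by (DATA_CODEWORDS * 8 - bits.length).toNat
decreasing_by simp only [List.length_append, length_pyBits8]; unfold DATA_CODEWORDS at *; omega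

def make_bitstream (text : String) : List Int :=
  -- text.encode("utf-8"): one byte per character, exact on Dom's ASCII-only strings
  let data : List Int := text.toList.map (fun c => (c.toNat : Int))
  let bits : List Int := [0, 1, 0, 0]
  let n : Int := (data.length : Int)
  let bits := bits ++ pyBits8 n
  let bits := data.foldl (fun bits b => bits ++ pyBits8 b) bits
  let capacity : Int := DATA_CODEWORDS * 8
  let bits := bits ++ PySem.List.pyRepeat [0] (min 4 (capacity - (bits.length : Int)))
  let bits := padAlign bits
  padECLoop bits 0

-- ===== PORT B =====
-- while len(codewords) < DATA_CODEWORDS: codewords.append([0xEC, 0x11][i % 2]); i += 1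
def padCW (cws : List Int) (i : Int) : List Int :=
  if (cws.length : Int) < DATA_CODEWORDS then
    padCW (cws ++ [PySem.List.pyGetD [0xEC, 0x11] (PySem.Int.mod i 2) 0]) (i + 1)
  else cws
termination_by (DATA_CODEWORDS - cws.length).toNat
decreasing_by simp only [List.length_append, List.length_cons, List.length_nil]; unfold DATA_CODEWORDS at *; omega

def make_bitstream_alt (text : String) : List Int :=
  let data : List Int := text.toList.map (fun c => (c.toNat : Int))
  let nb : Int := PySem.Int.band (data.length : Int) 0xFF
  let st := data.foldl
    (fun (st : List Int × Int) (b : Int) => (st.1 ++ [PySem.Int.bor (st.2 <<< 4) (b >>> 4)], PySem.Int.band b 0xF))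
    ([PySem.Int.bor 0x40 (nb >>> 4)], PySem.Int.band nb 0xF)
  let codewords := st.1 ++ [st.2 <<< 4]
  let codewords := padCW codewords 0
  codewords.flatMap pyBits8

-- ===== PRECONDITION & SPEC =====
def Spec_make_bitstream (text : String) (out : List Int) : Prop := out = make_bitstream_alt text
instance (text : String) (out : List Int) : Decidable (Spec_make_bitstream text out) := by unfold Spec_make_bitstream; infer_instance

-- ===== CLAIM (what is proved, stated in full; the proofs are below) =====
def Claim_equal_make_bitstream : Prop := ∀ (text : String), Dom_make_bitstream text → Spec_make_bitstream text (make_bitstream text)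

-- ===== LEMMAS AND PROOFS =====

-- the low nibble of a codeword, as 4 bits
def nib4 (q : Int) : List Int :=
  [PySem.Int.band (q >>> (3 : Int)) 1, PySem.Int.band (q >>> (2 : Int)) 1, PySem.Int.band (q >>> (1 : Int)) 1, PySem.Int.band q 1]

theorem pyBits8_def (x : Int) : pyBits8 x =
    [PySem.Int.band (x >>> (7 : Int)) 1, PySem.Int.band (x >>> (6 : Int)) 1, PySem.Int.band (x >>> (5 : Int)) 1, PySem.Int.band (x >>> (4 : Int)) 1,
     PySem.Int.band (x >>> (3 : Int)) 1, PySem.Int.band (x >>> (2 : Int)) 1, PySem.Int.band (x >>> (1 : Int)) 1, PySem.Int.band (x >>> (0 : Int)) 1] := by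
  have h : PySem.List.pyRange 7 (-1) (-1) = [7, 6, 5, 4, 3, 2, 1, 0] := by decide
  rw [pyBits8, h]; simp

theorem band_cast_15 (m : Nat) : PySem.Int.band (m : Int) 15 = ((m &&& 15 : Nat) : Int) := by
  exact_mod_cast PySem.Int.band_natCast m 15

theorem band_cast_255 (m : Nat) : PySem.Int.band (m : Int) 255 = ((m &&& 255 : Nat) : Int) := by
  exact_mod_cast PySem.Int.band_natCast m 255

theorem and_15_lt (m : Nat) : m &&& 15 < 16 := Nat.lt_succ_of_le (Nat.and_le_right)

theorem and_255_lt (m : Nat) : m &&& 255 < 256 := Nat.lt_succ_of_le (Nat.and_le_right)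

-- byte split: the 8 bits of a data byte are its two nibbles
set_option maxRecDepth 40000 in
theorem byte_split : ∀ b < 128, pyBits8 ((b : Nat) : Int)
    = nib4 (((b : Nat) : Int) >>> (4 : Int)) ++ nib4 (PySem.Int.band ((b : Nat) : Int) 15) := by decide

-- nibble-carry codeword: bits of (prev << 4) | (b >> 4)
set_option maxRecDepth 40000 in
theorem cw_split : ∀ p < 16, ∀ b < 128,
    pyBits8 (PySem.Int.bor (((p : Nat) : Int) <<< (4 : Int)) (((b : Nat) : Int) >>> (4 : Int)))
      = nib4 ((p : Nat) : Int) ++ nib4 (((b : Nat) : Int) >>> (4 : Int)) := by decide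

set_option maxRecDepth 40000 in
theorem cw_term : ∀ p < 16, pyBits8 (((p : Nat) : Int) <<< (4 : Int)) = nib4 ((p : Nat) : Int) ++ [0, 0, 0, 0] := by decide

set_option maxRecDepth 40000 in
theorem cw_head : ∀ m < 256,
    pyBits8 (PySem.Int.bor 0x40 (((m : Nat) : Int) >>> (4 : Int))) ++ nib4 (PySem.Int.band ((m : Nat) : Int) 15)
      = [0, 1, 0, 0] ++ pyBits8 ((m : Nat) : Int) := by decide

-- only the low 8 bits of the length enter the bit stream
theorem low8 (m : Nat) : pyBits8 (m : Int) = pyBits8 ((m &&& 255 : Nat) : Int) := by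
  have h255 : m &&& 255 = m % 256 := by
    have h := Nat.and_two_pow_sub_one_eq_mod m 8
    norm_num at h
    exact h
  have h : ∀ k, k < 8 → (m >>> k) &&& 1 = ((m &&& 255) >>> k) &&& 1 := by
    intro k hk
    interval_cases k <;> simp only [Nat.shiftRight_eq_div_pow, Nat.and_one_is_mod, h255] <;> omega
  have e : ∀ (M k : Nat), PySem.Int.band ((M : Int) >>> ((k : Nat) : Int)) (((1 : Nat) : Int)) = ((M >>> k &&& 1 : Nat) : Int) := by
    intro M k
    rw [Int.shiftRight_natCast]
    exact PySem.Int.band_natCast _ 1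
  simp only [pyBits8_def]
  rw [show ((7:Int)) = ((7:Nat):Int) by norm_num, show ((6:Int)) = ((6:Nat):Int) by norm_num,
      show ((5:Int)) = ((5:Nat):Int) by norm_num, show ((4:Int)) = ((4:Nat):Int) by norm_num,
      show ((3:Int)) = ((3:Nat):Int) by norm_num, show ((2:Int)) = ((2:Nat):Int) by norm_num,
      show ((1:Int)) = ((1:Nat):Int) by norm_num, show ((0:Int)) = ((0:Nat):Int) by norm_num]
  simp only [e]
  simp only [h 7 (by omega), h 6 (by omega), h 5 (by omega), h 4 (by omega),
             h 3 (by omega), h 2 (by omega), h 1 (by omega), h 0 (by omega)]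

theorem flat_len (cws : List Int) : (cws.flatMap pyBits8).length = 8 * cws.length := by
  induction cws with
  | nil => simp
  | cons c t ih => simp [List.flatMap_cons, ih, length_pyBits8]; omega

theorem padAlign_step (bits : List Int) (h : bits.length % 8 ≠ 0) : padAlign bits = padAlign (bits ++ [0]) := by
  rw [padAlign, if_pos h]

theorem padAlign_stop (bits : List Int) (h : bits.length % 8 = 0) : padAlign bits = bits := by
  rw [padAlign, if_neg (by omega)]

theorem padAlign_mod4 (bits : List Int) (h : bits.length % 8 = 4) : padAlign bits = bits ++ [0, 0, 0, 0] := by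
  rw [padAlign_step _ (by omega),
      padAlign_step _ (by simp; omega),
      padAlign_step _ (by simp; omega),
      padAlign_step _ (by simp; omega),
      padAlign_stop _ (by simp; omega)]
  simp

-- A's two padding steps together always append exactly [0,0,0,0]
theorem A_pad (bits : List Int) (h : bits.length % 8 = 4) :
    padAlign (bits ++ PySem.List.pyRepeat [0] (min 4 (DATA_CODEWORDS * 8 - (bits.length : Int)))) = bits ++ [0, 0, 0, 0] := by
  rw [PySem.List.pyRepeat_singleton]
  by_cases hc : bits.length ≤ 436
  · have h4 : (min 4 (DATA_CODEWORDS * 8 - (bits.length : Int))).toNat = 4 := by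
      unfold DATA_CODEWORDS; omega
    rw [h4]
    have hrep : List.replicate 4 (0 : Int) = [0, 0, 0, 0] := rfl
    rw [hrep, padAlign_stop _ (by simp; omega)]
  · have h0 : (min 4 (DATA_CODEWORDS * 8 - (bits.length : Int))).toNat = 0 := by
      unfold DATA_CODEWORDS; omega
    rw [h0]
    simpa using padAlign_mod4 _ h

theorem padECLoop_step (bits : List Int) (i : Int) (h : (bits.length : Int) < DATA_CODEWORDS * 8) :
    padECLoop bits i = padECLoop (bits ++ pyBits8 (PySem.List.pyGetD [0xEC, 0x11] (PySem.Int.mod i 2) 0)) (i + 1) := by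
  conv_lhs => unfold padECLoop
  rw [if_pos h]

theorem padECLoop_stop (bits : List Int) (i : Int) (h : ¬ ((bits.length : Int) < DATA_CODEWORDS * 8)) :
    padECLoop bits i = bits := by
  unfold padECLoop; rw [if_neg h]

theorem padCW_step (cws : List Int) (i : Int) (h : (cws.length : Int) < DATA_CODEWORDS) :
    padCW cws i = padCW (cws ++ [PySem.List.pyGetD [0xEC, 0x11] (PySem.Int.mod i 2) 0]) (i + 1) := by
  conv_lhs => unfold padCW
  rw [if_pos h]

theorem padCW_stop (cws : List Int) (i : Int) (h : ¬ ((cws.length : Int) < DATA_CODEWORDS)) :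
    padCW cws i = cws := by
  unfold padCW; rw [if_neg h]

theorem pad_corr (cws : List Int) (i : Int) :
    padECLoop (cws.flatMap pyBits8) i = (padCW cws i).flatMap pyBits8 := by
  induction cws, i using padCW.induct with
  | case1 cws i h ih =>
    rw [padECLoop_step _ _ (by rw [flat_len]; unfold DATA_CODEWORDS at h ⊢; omega)]
    rw [padCW_step _ _ h]
    have hstep : cws.flatMap pyBits8 ++ pyBits8 (PySem.List.pyGetD [0xEC, 0x11] (PySem.Int.mod i 2) 0)
        = (cws ++ [PySem.List.pyGetD [0xEC, 0x11] (PySem.Int.mod i 2) 0]).flatMap pyBits8 := by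
      simp [List.flatMap_append]
    rw [hstep, ih]
  | case2 cws i h =>
    rw [padECLoop_stop _ _ (by rw [flat_len]; unfold DATA_CODEWORDS at h ⊢; omega)]
    rw [padCW_stop _ _ h]

-- main fold correspondence: B's codeword fold flattens to A's byte bits, with the pending low nibble
theorem fold_corr (l : List Char) (hl : ∀ c ∈ l, pvDomChar c = true) (cws : List Int) (prev : Nat) (hp : prev < 16) :
    ∃ (cws' : List Int) (prev' : Nat), prev' < 16 ∧
      (l.map (fun c => (c.toNat : Int))).foldl
          (fun (st : List Int × Int) (b : Int) => (st.1 ++ [PySem.Int.bor (st.2 <<< 4) (b >>> 4)], PySem.Int.band b 0xF))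
          (cws, ((prev : Nat) : Int))
        = (cws', ((prev' : Nat) : Int)) ∧
      cws'.flatMap pyBits8 ++ nib4 ((prev' : Nat) : Int)
        = cws.flatMap pyBits8 ++ nib4 ((prev : Nat) : Int)
            ++ (l.map (fun c => (c.toNat : Int))).flatMap pyBits8 := by
  induction l generalizing cws prev with
  | nil => exact ⟨cws, prev, hp, rfl, by simp⟩
  | cons c t ih =>
    have hc : c.toNat < 128 := by
      have := hl c (by simp)
      simp [pvDomChar] at this
      omega
    have hband : PySem.Int.band ((c.toNat : Nat) : Int) 0xF = ((c.toNat &&& 15 : Nat) : Int) := band_cast_15 c.toNat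
    obtain ⟨cws', prev', hp', heq, hflat⟩ :=
      ih (fun x hx => hl x (by simp [hx]))
        (cws ++ [PySem.Int.bor (((prev : Nat) : Int) <<< 4) (((c.toNat : Nat) : Int) >>> 4)])
        (c.toNat &&& 15) (and_15_lt c.toNat)
    refine ⟨cws', prev', hp', ?_, ?_⟩
    · simpa [hband] using heq
    · rw [hflat]
      simp only [List.map_cons, List.flatMap_cons, List.flatMap_append, List.flatMap_nil]
      rw [cw_split prev hp c.toNat hc, byte_split c.toNat hc, band_cast_15]
      simp [List.append_assoc]

-- ===== VERDICT (by name: the statement is the Claim_ definition above) =====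
theorem make_bitstream_spec : Claim_equal_make_bitstream := by
  intro text hdom
  unfold Spec_make_bitstream make_bitstream make_bitstream_alt
  dsimp only
  simp only [List.length_map]
  rw [PySem.List.foldl_append_eq_flatMap]
  set l := text.toList with hldef
  set L := l.length with hLdef
  set flat := (l.map (fun c => (c.toNat : Int))).flatMap pyBits8 with hflatdef
  have hdomc : ∀ c ∈ l, pvDomChar c = true := by
    intro c hcmem
    unfold Dom_make_bitstream pvDomStr at hdom
    exact List.all_eq_true.mp hdom c hcmem
  -- A-side padding collapses to four zero bits
  have hcorelen : (([0, 1, 0, 0] ++ pyBits8 (L : Int)) ++ flat).length % 8 = 4 := by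
    simp only [List.length_append, length_pyBits8, hflatdef, flat_len, List.length_map,
      List.length_cons, List.length_nil]
    omega
  rw [A_pad _ hcorelen]
  rw [band_cast_255 L, band_cast_15 (L &&& 255)]
  obtain ⟨cws', prev', hp', heq, hflat⟩ :=
    fold_corr l hdomc [PySem.Int.bor 64 (((L &&& 255 : Nat) : Int) >>> 4)] (L &&& 255 &&& 15) (and_15_lt _)
  rw [heq]
  dsimp only
  rw [← pad_corr]
  congr 1
  rw [List.flatMap_append]
  simp only [List.flatMap_cons, List.flatMap_nil, List.append_nil]
  rw [cw_term prev' hp', ← List.append_assoc, hflat]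
  simp only [List.flatMap_cons, List.flatMap_nil, List.append_nil]
  have hh := cw_head (L &&& 255) (and_255_lt L)
  rw [band_cast_15] at hh
  rw [← low8 L] at hh
  rw [hh]
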